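-- pv_equiv track=rewrite | github.com/r2nochi/Comision-Project | commission_system/profiles/sanitas_liquidation.py | _group_tokens_into_lines
-- ===== SOURCE A (Python) =====
-- LINE_GROUP_GAP = 12
--
-- def _group_tokens_into_lines(tokens: list[tuple[int, int, str]]) -> list[list[tuple[int, int, str]]]:
--     clusters: list[list[tuple[int, int, str]]] = []
--     cluster_tops: list[int] = []
--     for top, left, text in tokens:
--         if not clusters or abs(top - cluster_tops[-1]) > LINE_GROUP_GAP:
--             clusters.append([(top, left, text)])
--             cluster_tops.append(top)
--         else:
--             clusters[-1].append((top, left, text))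
--     return clusters
-- ===== SOURCE B (Python) =====
-- LINE_GROUP_GAP = 12
--
-- def _group_tokens_into_lines(tokens: list[tuple[int, int, str]]) -> list[list[tuple[int, int, str]]]:
--     # Recursive span decomposition: peel off the leading run of tokens whose
--     # top is within LINE_GROUP_GAP of the first token's top, recurse on the rest.
--     if not tokens:
--         return []
--     ref = tokens[0][0]
--     k = 1
--     while k < len(tokens) and abs(tokens[k][0] - ref) <= LINE_GROUP_GAP:
--         k += 1
--     return [tokens[:k]] + _group_tokens_into_lines(tokens[k:])
-- ===== Notes on version B (the rewrite author's own statement) =====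
-- stated objective: alternative
-- what changed: A builds all clusters in one interleaved loop carrying parallel clusters/cluster_tops accumulators and appending into the last cluster; B is a recursive span: it scans the leading run of tokens within the gap of the first token's top, slices it off whole, and recurses on the remainder.
import Mathlib
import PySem

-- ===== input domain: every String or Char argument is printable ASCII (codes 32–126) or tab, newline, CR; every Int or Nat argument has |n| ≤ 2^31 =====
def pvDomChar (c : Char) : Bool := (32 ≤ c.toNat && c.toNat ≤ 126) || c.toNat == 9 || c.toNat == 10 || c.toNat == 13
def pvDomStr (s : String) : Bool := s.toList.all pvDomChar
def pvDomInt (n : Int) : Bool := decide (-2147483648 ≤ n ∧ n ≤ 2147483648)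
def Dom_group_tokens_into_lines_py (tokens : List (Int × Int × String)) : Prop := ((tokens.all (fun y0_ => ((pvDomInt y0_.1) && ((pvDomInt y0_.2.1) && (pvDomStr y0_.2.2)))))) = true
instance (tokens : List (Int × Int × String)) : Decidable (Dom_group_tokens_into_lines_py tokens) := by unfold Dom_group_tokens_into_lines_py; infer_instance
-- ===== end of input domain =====

-- B replaces A's single interleaved accumulator loop by a recursive span
-- (peel the leading within-gap run, recurse on the rest); objective: alternative decomposition, same cost.

-- ===== PORT A =====
-- one step of A's loop over state (clusters, cluster_tops)
def pvAStep (st : List (List (Int × Int × String)) × List Int)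
    (tok : Int × Int × String) : List (List (Int × Int × String)) × List Int :=
  if st.1 = [] ∨ (12 : Int) < |tok.1 - st.2.getLastD 0| then
    (st.1 ++ [[tok]], st.2 ++ [tok.1])
  else
    (st.1.dropLast ++ [st.1.getLastD [] ++ [tok]], st.2)

def group_tokens_into_lines_py (tokens : List (Int × Int × String)) : List (List (Int × Int × String)) :=
  (tokens.foldl pvAStep ([], [])).1

-- ===== PORT B =====
-- length of the leading run of tokens whose top is within 12 of ref (B's inner while loop)
def pvRun (ref : Int) : List (Int × Int × String) → Nat
  | [] => 0
  | t :: ts => if |t.1 - ref| ≤ 12 then pvRun ref ts + 1 else 0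

theorem pvRun_le (ref : Int) (ts : List (Int × Int × String)) : pvRun ref ts ≤ ts.length := by
  induction ts with
  | nil => simp [pvRun]
  | cons t ts ih =>
    simp only [pvRun, List.length_cons]
    split_ifs <;> omega

def group_tokens_into_lines_py_alt (tokens : List (Int × Int × String)) : List (List (Int × Int × String)) :=
  match tokens with
  | [] => []
  | t :: rest =>
    let k := pvRun t.1 rest
    (t :: rest.take k) :: group_tokens_into_lines_py_alt (rest.drop k)
termination_by tokens.length
decreasing_by
  have := pvRun_le t.1 rest
  simp only [List.length_drop, List.length_cons]
  omega

-- ===== PRECONDITION & SPEC =====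
def Spec_group_tokens_into_lines_py (tokens : List (Int × Int × String)) (out : List (List (Int × Int × String))) : Prop := out = group_tokens_into_lines_py_alt tokens
instance (tokens : List (Int × Int × String)) (out : List (List (Int × Int × String))) : Decidable (Spec_group_tokens_into_lines_py tokens out) := by unfold Spec_group_tokens_into_lines_py; infer_instance

-- ===== CLAIM (what is proved, stated in full; the proofs are below) =====
def Claim_equal_group_tokens_into_lines_py : Prop := ∀ (tokens : List (Int × Int × String)), Dom_group_tokens_into_lines_py tokens → Spec_group_tokens_into_lines_py tokens (group_tokens_into_lines_py tokens)

-- ===== LEMMAS AND PROOFS =====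

-- abstract continuation of A's loop once one cluster exists: only the last top r and last cluster L matter
def pvConsume (r : Int) (L : List (Int × Int × String)) :
    List (Int × Int × String) → List (List (Int × Int × String))
  | [] => [L]
  | t :: ts => if (12 : Int) < |t.1 - r| then L :: pvConsume t.1 [t] ts else pvConsume r (L ++ [t]) ts

theorem pvFoldl_consume (tokens : List (Int × Int × String)) :
    ∀ (C : List (List (Int × Int × String))) (L : List (Int × Int × String))
      (T : List Int) (r : Int),
    (tokens.foldl pvAStep (C ++ [L], T ++ [r])).1 = C ++ pvConsume r L tokens := by
  induction tokens with
  | nil => intro C L T r; simp [pvConsume]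
  | cons t ts ih =>
    intro C L T r
    simp only [List.foldl_cons, pvAStep, pvConsume]
    by_cases h : (12 : Int) < |t.1 - r|
    · have hc : (C ++ [L] = [] ∨ (12 : Int) < |t.1 - (T ++ [r]).getLastD 0| ) := by
        right; simpa using h
      rw [if_pos hc, if_pos h]
      have : C ++ [L] ++ [[t]] = (C ++ [L]) ++ [[t]] := rfl
      rw [show (C ++ [L]) ++ [[t]] = (C ++ [L]) ++ [[t]] from rfl,
          show (T ++ [r]) ++ [t.1] = (T ++ [r]) ++ [t.1] from rfl]
      rw [ih (C ++ [L]) [t] (T ++ [r]) t.1]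
      simp
    · have hc : ¬ (C ++ [L] = [] ∨ (12 : Int) < |t.1 - (T ++ [r]).getLastD 0|) := by
        simp only [List.getLastD_concat]
        push Not
        exact ⟨by simp, le_of_not_gt h⟩
      rw [if_neg hc, if_neg h]
      have h1 : (C ++ [L]).dropLast = C := by simp
      have h2 : (C ++ [L]).getLastD [] = L := by simp
      rw [h1, h2, ih C (L ++ [t]) T r]

theorem pvConsume_alt (ts : List (Int × Int × String)) :
    ∀ (r : Int) (L : List (Int × Int × String)),
    pvConsume r L ts =
      (L ++ ts.take (pvRun r ts)) :: group_tokens_into_lines_py_alt (ts.drop (pvRun r ts)) := by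
  induction ts with
  | nil => intro r L; simp [pvConsume, pvRun, group_tokens_into_lines_py_alt]
  | cons t ts ih =>
    intro r L
    simp only [pvConsume, pvRun]
    by_cases h : (12 : Int) < |t.1 - r|
    · rw [if_pos h, if_neg (by omega : ¬ |t.1 - r| ≤ 12)]
      simp only [List.take_zero, List.drop_zero, List.append_nil]
      rw [group_tokens_into_lines_py_alt]
      rw [ih t.1 [t]]
      simp
    · rw [if_neg h, if_pos (by omega : |t.1 - r| ≤ 12)]
      rw [ih r (L ++ [t])]
      simp

-- ===== VERDICT (by name: the statement is the Claim_ definition above) =====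
theorem group_tokens_into_lines_py_spec : Claim_equal_group_tokens_into_lines_py := by
  intro tokens _
  unfold Spec_group_tokens_into_lines_py group_tokens_into_lines_py
  cases tokens with
  | nil => simp [group_tokens_into_lines_py_alt]
  | cons t ts =>
    rw [List.foldl_cons]
    have hstep : pvAStep ([], []) t = ([] ++ [[t]], [] ++ [t.1]) := by
      simp [pvAStep]
    rw [hstep, pvFoldl_consume ts [] [t] [] t.1, pvConsume_alt ts t.1 [t]]
    rw [group_tokens_into_lines_py_alt]
    simp
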